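-- pv_equiv track=rewrite | github.com/gytgyt0213/FoLQA | create_dataset/create_question/filter1/get_questions.py | process_rel_ids_with_logic_not
-- ===== SOURCE A (Python) =====
-- def process_rel_ids_with_logic_not(rel_ids, id2rel):
--     rel_strs = []
--     i = 0
--     while i < len(rel_ids):
--         if i + 1 < len(rel_ids) and rel_ids[i + 1] == -2:
--             rel_str = id2rel.get(rel_ids[i], f"[REL_{rel_ids[i]}]") + " (Logic_NOT)"
--             rel_strs.append(rel_str)
--             i += 2
--         else:
--             rel_str = id2rel.get(rel_ids[i], f"[REL_{rel_ids[i]}]")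
--             rel_strs.append(rel_str)
--             i += 1
--     return rel_strs
-- ===== SOURCE B (Python) =====
-- def process_rel_ids_with_logic_not(rel_ids, id2rel):
--     rel_strs = []
--     consumed_prev = False
--     for rid in rel_ids:
--         if rid == -2 and rel_strs and not consumed_prev:
--             rel_strs[-1] += " (Logic_NOT)"
--             consumed_prev = True
--         else:
--             rel_strs.append(id2rel.get(rid, f"[REL_{rid}]"))
--             consumed_prev = False
--     return rel_strs
-- ===== Notes on version B (the rewrite author's own statement) =====
-- stated objective: alternative
-- what changed: Replaces A's index-based while loop with one-element lookahead and a skip-by-two step by a single forward for-loop with no lookahead that, on seeing -2, attaches the ' (Logic_NOT)' marker backward onto the last emitted string, guarded by a consumed_prev flag to preserve the consecutive -2 pairing parity.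
import Mathlib
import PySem

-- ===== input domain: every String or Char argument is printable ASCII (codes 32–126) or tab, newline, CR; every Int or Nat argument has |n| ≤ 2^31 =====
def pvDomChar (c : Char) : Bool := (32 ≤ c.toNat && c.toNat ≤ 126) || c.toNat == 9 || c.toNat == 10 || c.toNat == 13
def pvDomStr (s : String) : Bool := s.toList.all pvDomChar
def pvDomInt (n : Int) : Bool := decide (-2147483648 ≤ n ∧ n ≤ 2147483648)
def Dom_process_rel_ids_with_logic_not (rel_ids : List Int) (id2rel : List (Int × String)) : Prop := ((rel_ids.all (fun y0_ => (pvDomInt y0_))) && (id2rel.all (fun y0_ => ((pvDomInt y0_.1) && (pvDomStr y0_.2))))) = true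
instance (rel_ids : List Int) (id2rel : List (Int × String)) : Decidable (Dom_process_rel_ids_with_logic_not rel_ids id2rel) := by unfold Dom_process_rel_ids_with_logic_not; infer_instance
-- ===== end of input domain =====

-- B replaces A's index/lookahead while-loop by a single forward pass with a consumed_prev flag
-- that attaches the " (Logic_NOT)" marker backward onto the last emitted string (alternative decomposition).


-- ===== PORT A =====
def pvLookup (id2rel : List (Int × String)) (x : Int) : String :=
  PySem.Dict.getD (PySem.Dict.mk id2rel) x ("[REL_" ++ PySem.Int.toStr x ++ "]")

-- A: while-loop with index and lookahead rel_ids[i+1] == -2, consuming two ids per marked pair.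
def process_rel_ids_with_logic_not (rel_ids : List Int) (id2rel : List (Int × String)) : List String :=
  match rel_ids with
  | [] => []
  | [x] => [pvLookup id2rel x]
  | x :: y :: rest =>
    if y = -2 then
      (pvLookup id2rel x ++ " (Logic_NOT)") :: process_rel_ids_with_logic_not rest id2rel
    else
      pvLookup id2rel x :: process_rel_ids_with_logic_not (y :: rest) id2rel

-- ===== PORT B =====
-- B: single forward pass, no lookahead; attaches the marker backward onto the last emitted
-- string, guarded by a consumed_prev flag (accumulator kept reversed, reversed at the end).
def pvGoB (id2rel : List (Int × String)) (res : List String) (consumed : Bool) : List Int → List String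
  | [] => res.reverse
  | rid :: rest =>
    if rid = -2 ∧ res ≠ [] ∧ consumed = false then
      match res with
      | h :: t => pvGoB id2rel ((h ++ " (Logic_NOT)") :: t) true rest
      | [] => pvGoB id2rel res true rest
    else
      pvGoB id2rel (pvLookup id2rel rid :: res) false rest

def process_rel_ids_with_logic_not_alt (rel_ids : List Int) (id2rel : List (Int × String)) : List String :=
  pvGoB id2rel [] false rel_ids

-- ===== PRECONDITION & SPEC =====
def Spec_process_rel_ids_with_logic_not (rel_ids : List Int) (id2rel : List (Int × String)) (out : List String) : Prop := out = process_rel_ids_with_logic_not_alt rel_ids id2rel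
instance (rel_ids : List Int) (id2rel : List (Int × String)) (out : List String) : Decidable (Spec_process_rel_ids_with_logic_not rel_ids id2rel out) := by unfold Spec_process_rel_ids_with_logic_not; infer_instance

-- ===== CLAIM (what is proved, stated in full; the proofs are below) =====
def Claim_equal_process_rel_ids_with_logic_not : Prop := ∀ (rel_ids : List Int) (id2rel : List (Int × String)), Dom_process_rel_ids_with_logic_not rel_ids id2rel → Spec_process_rel_ids_with_logic_not rel_ids id2rel (process_rel_ids_with_logic_not rel_ids id2rel)

-- ===== LEMMAS AND PROOFS =====

theorem pvGoB_eq (id2rel : List (Int × String)) :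
    ∀ (xs : List Int) (res : List String) (b : Bool),
      (∀ y rest, xs = y :: rest → y = -2 → res = [] ∨ b = true) →
      pvGoB id2rel res b xs = res.reverse ++ process_rel_ids_with_logic_not xs id2rel := by
  intro xs
  induction xs using process_rel_ids_with_logic_not.induct with
  | case1 =>
    intro res b _
    simp [pvGoB, process_rel_ids_with_logic_not]
  | case2 x =>
    intro res b h
    by_cases hx : x = -2
    · rcases h x [] rfl hx with hres | hb
      · subst hres
        simp [pvGoB, process_rel_ids_with_logic_not, hx]
      · subst hb
        simp [pvGoB, process_rel_ids_with_logic_not]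
    · simp [pvGoB, process_rel_ids_with_logic_not, hx]
  | case3 x rest ih =>
    intro res b h
    have hstep : pvGoB id2rel res b (x :: -2 :: rest)
        = pvGoB id2rel ((pvLookup id2rel x ++ " (Logic_NOT)") :: res) true rest := by
      by_cases hx : x = -2
      · rcases h x (-2 :: rest) rfl hx with hres | hb
        · subst hres; simp [pvGoB]
        · subst hb; simp [pvGoB]
      · simp [pvGoB, hx]
    rw [hstep, ih ((pvLookup id2rel x ++ " (Logic_NOT)") :: res) true (by intro y rest h1 h2; right; rfl)]
    simp [process_rel_ids_with_logic_not]
  | case4 x y rest hy ih =>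
    intro res b h
    have hstep : pvGoB id2rel res b (x :: y :: rest)
        = pvGoB id2rel (pvLookup id2rel x :: res) false (y :: rest) := by
      by_cases hx : x = -2
      · rcases h x (y :: rest) rfl hx with hres | hb
        · subst hres; simp [pvGoB]
        · subst hb; simp [pvGoB]
      · simp [pvGoB, hx]
    rw [hstep, ih (pvLookup id2rel x :: res) false (by intro z rest' h1 h2; cases h1; exact absurd h2 hy)]
    simp [process_rel_ids_with_logic_not, hy]

-- ===== VERDICT (by name: the statement is the Claim_ definition above) =====
theorem process_rel_ids_with_logic_not_spec : Claim_equal_process_rel_ids_with_logic_not := by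
  intro rel_ids id2rel _
  unfold Spec_process_rel_ids_with_logic_not process_rel_ids_with_logic_not_alt
  rw [pvGoB_eq id2rel rel_ids [] false (by intro y rest h1 h2; left; rfl)]
  simp
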